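-- pv_equiv track=rewrite | github.com/wired87/cor | guard.py | is_interaction_eq
-- ===== SOURCE A (Python) =====
-- def is_interaction_eq(params, modules_params:list[str], modules_return_map:list[str]):
--     """
--     Is interaction eq for the Guard workflow.
--
--     Workflow:
--     1. Reads and normalizes the incoming inputs, including `params`, `modules_params`, `modules_return_map`.
--     2. Builds intermediate state such as `normalized`, `has_duplicates`, `prefixed_dublet` before applying the main logic.
--     3. Branches on validation or runtime state to choose the next workflow path.
--     4. Delegates side effects or helper work through `any()`, `p.replace()`, `normalized.count()`.
--     5. Returns the assembled result to the caller.
--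
--     Inputs:
--     - `params`: Caller-supplied value used during processing.
--     - `modules_params`: Caller-supplied value used during processing. Expected type: `list[str]`.
--     - `modules_return_map`: Caller-supplied value used during processing. Expected type: `list[str]`.
--
--     Returns:
--     - Returns the computed result for the caller.
--     """
--     normalized = [p.replace("_", "") for p in params]
--     has_duplicates = any(normalized.count(norm_p) == 2 for norm_p in set(normalized) if norm_p)
--     prefixed_dublet = any(pid.endswith("_") for pid in params) and any(pid.startswith("_") for pid in params)
--     params_of_different_fields = any(p not in modules_params for p in params) or any(p not in modules_return_map for p in params)
--     if has_duplicates or prefixed_dublet or params_of_different_fields: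
--         return True
--     return False
-- ===== SOURCE B (Python) =====
-- def is_interaction_eq(params, modules_params: list[str], modules_return_map: list[str]):
--     """Staged early-return checks: duplicate detection by sorting the stripped
--     names and scanning run lengths, then the underscore pair test, then a
--     set-inclusion field check."""
--     # 1) exactly-two duplicate among non-empty stripped names: sort, scan runs
--     norms = sorted(n for n in (p.replace("_", "") for p in params) if n)
--     run_val, run_len = None, 0
--     has_dup = False
--     for v in norms:
--         if v == run_val:
--             run_len += 1
--         else:
--             if run_len == 2:
--                 has_dup = True
--             run_val, run_len = v, 1
--     if run_len == 2:
--         has_dup = True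
--     if has_dup:
--         return True
--     # 2) some param ends with '_' and some param starts with '_'
--     if any(p.endswith("_") for p in params) and any(p.startswith("_") for p in params):
--         return True
--     # 3) every param must occur in both field lists
--     ps = set(params)
--     return not (ps <= set(modules_params) and ps <= set(modules_return_map))
-- ===== Notes on version B (the rewrite author's own statement) =====
-- stated objective: alternative
-- what changed: Duplicate detection is done by sorting the non-empty stripped names and scanning run lengths for a run of exactly 2 (instead of counting each distinct element over the whole list), the field checks become a single set-inclusion test, and the three checks are staged with early returns instead of computed up front and or-ed.
import Mathlib
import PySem

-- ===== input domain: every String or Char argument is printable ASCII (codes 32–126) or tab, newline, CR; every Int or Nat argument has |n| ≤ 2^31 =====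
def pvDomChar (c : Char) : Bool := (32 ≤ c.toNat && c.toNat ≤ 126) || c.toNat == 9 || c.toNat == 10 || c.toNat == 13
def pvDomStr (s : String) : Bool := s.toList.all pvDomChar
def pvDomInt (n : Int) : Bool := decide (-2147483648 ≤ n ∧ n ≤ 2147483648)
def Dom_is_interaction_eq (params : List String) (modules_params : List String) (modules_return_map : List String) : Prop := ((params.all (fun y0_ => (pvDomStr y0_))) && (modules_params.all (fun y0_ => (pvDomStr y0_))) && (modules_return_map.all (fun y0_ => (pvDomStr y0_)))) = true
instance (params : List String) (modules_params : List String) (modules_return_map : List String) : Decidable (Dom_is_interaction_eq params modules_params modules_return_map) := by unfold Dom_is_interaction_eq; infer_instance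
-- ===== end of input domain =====

-- B replaces A's count-per-distinct-element duplicate scan by sort-then-run-length scanning,
-- and the per-element field checks by a set-inclusion test (objective: alternative algorithm).

-- ===== PORT A =====
def is_interaction_eq (params : List String) (modules_params : List String) (modules_return_map : List String) : Bool :=
  let normalized := params.map (fun p => PySem.Str.replace p "_" "")
  let has_duplicates := (PySem.Set.ofList normalized).any
      (fun norm_p => decide (norm_p ≠ "") && (normalized.count norm_p == 2))
  let prefixed_dublet := params.any (fun pid => PySem.Str.endswith pid "_") &&
      params.any (fun pid => PySem.Str.startswith pid "_")
  let params_of_different_fields := params.any (fun p => !(modules_params.contains p)) ||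
      params.any (fun p => !(modules_return_map.contains p))
  if has_duplicates || prefixed_dublet || params_of_different_fields then true else false

-- ===== PORT B =====
-- run-length scan step: state = (current run value, current run length, run-of-2 seen so far)
def pvRunStep (st : Option String × Int × Bool) (v : String) : Option String × Int × Bool :=
  if st.1 = some v then (st.1, st.2.1 + 1, st.2.2)
  else (some v, 1, st.2.2 || (st.2.1 == 2))

def is_interaction_eq_alt (params : List String) (modules_params : List String) (modules_return_map : List String) : Bool :=
  let norms := PySem.List.sorted
      ((params.map (fun p => PySem.Str.replace p "_" "")).filter (fun n => decide (n ≠ "")))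
      (fun x => x) false
  let st := norms.foldl pvRunStep (none, 0, false)
  let has_dup := st.2.2 || (st.2.1 == 2)
  if has_dup then true
  else if params.any (fun p => PySem.Str.endswith p "_") && params.any (fun p => PySem.Str.startswith p "_") then true
  else
    let ps := PySem.Set.ofList params
    !(PySem.Set.issubset ps (PySem.Set.ofList modules_params) &&
      PySem.Set.issubset ps (PySem.Set.ofList modules_return_map))

-- ===== PRECONDITION & SPEC =====
def Spec_is_interaction_eq (params : List String) (modules_params : List String) (modules_return_map : List String) (out : Bool) : Prop := out = is_interaction_eq_alt params modules_params modules_return_map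
instance (params : List String) (modules_params : List String) (modules_return_map : List String) (out : Bool) : Decidable (Spec_is_interaction_eq params modules_params modules_return_map out) := by unfold Spec_is_interaction_eq; infer_instance

-- ===== CLAIM (what is proved, stated in full; the proofs are below) =====
def Claim_equal_is_interaction_eq : Prop := ∀ (params : List String) (modules_params : List String) (modules_return_map : List String), Dom_is_interaction_eq params modules_params modules_return_map → Spec_is_interaction_eq params modules_params modules_return_map (is_interaction_eq params modules_params modules_return_map)

-- ===== LEMMAS AND PROOFS =====

-- On a sorted tail, the run scan from state (some x, c, b) reports: a run of 2 already seen,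
-- or the run of x (c so far plus its copies in s) closes at 2, or some later value occurs exactly twice.
theorem runScan_spec (s : List String) (x : String) (c : Int) (b : Bool)
    (hs : List.Pairwise (· ≤ ·) (x :: s)) :
    (let st := s.foldl pvRunStep (some x, c, b); st.2.2 || (st.2.1 == 2))
    = (b || decide (c + (s.count x : Int) = 2) || decide (∃ v ∈ s, v ≠ x ∧ s.count v = 2)) := by
  induction s generalizing x c b with
  | nil => rw [List.foldl_nil, Bool.eq_iff_iff]; simp
  | cons y t ih =>
      by_cases hxy : x = y
      · subst hxy
        have hx : List.Pairwise (· ≤ ·) (x :: t) := by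
          rcases List.pairwise_cons.mp hs with ⟨h1, h2⟩
          exact List.pairwise_cons.mpr ⟨fun z hz => h1 z (List.mem_cons_of_mem _ hz),
            (List.pairwise_cons.mp h2).2⟩
        rw [List.foldl_cons, show pvRunStep (some x, c, b) x = (some x, c + 1, b) from by
          simp [pvRunStep]]
        rw [ih x (c + 1) b hx]
        congr 1
        · congr 1
          rw [decide_eq_decide]
          simp only [List.count_cons_self]
          push_cast; omega
        · rw [decide_eq_decide]
          constructor
          · rintro ⟨v, hv, hne, hc⟩
            refine ⟨v, List.mem_cons_of_mem _ hv, hne, ?_⟩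
            rwa [List.count_cons_of_ne (fun h => hne h.symm)]
          · rintro ⟨v, hv, hne, hc⟩
            rcases List.mem_cons.mp hv with h | h
            · exact absurd h hne
            · exact ⟨v, h, hne, by rwa [List.count_cons_of_ne (fun h => hne h.symm)] at hc⟩
      · -- y starts a new run; x cannot reappear in y :: t
        have hxle : ∀ z ∈ y :: t, x ≤ z := (List.pairwise_cons.mp hs).1
        have hyt : List.Pairwise (· ≤ ·) (y :: t) := (List.pairwise_cons.mp hs).2
        have hxnot : x ∉ y :: t := by
          intro hmem
          rcases List.mem_cons.mp hmem with h | h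
          · exact hxy h
          · exact hxy (le_antisymm (hxle y (List.mem_cons_self))
              ((List.pairwise_cons.mp hyt).1 x h))
        rw [List.foldl_cons, show pvRunStep (some x, c, b) y = (some y, 1, b || (c == 2)) from by
          simp [pvRunStep, hxy]]
        rw [ih y 1 (b || (c == 2)) hyt]
        have hcx : (y :: t).count x = 0 := List.count_eq_zero.mpr hxnot
        have hxnt : x ∉ t := fun h => hxnot (List.mem_cons_of_mem _ h)
        rw [hcx]
        have h2 : decide (c + ((0 : Nat) : Int) = 2) = (c == 2) := by
          rw [Bool.eq_iff_iff]; simp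
        rw [h2]
        have h3 : decide (∃ v ∈ y :: t, v ≠ x ∧ (y :: t).count v = 2)
            = (decide (1 + (t.count y : Int) = 2) || decide (∃ v ∈ t, v ≠ y ∧ t.count v = 2)) := by
          rw [Bool.eq_iff_iff]
          simp only [Bool.or_eq_true, decide_eq_true_eq]
          constructor
          · rintro ⟨v, hv, hne, hc⟩
            rcases List.mem_cons.mp hv with h | h
            · subst h; left; rw [List.count_cons_self] at hc; omega
            · by_cases hvy : v = y
              · subst hvy; left; rw [List.count_cons_self] at hc; omega
              · right; exact ⟨v, h, hvy, by rwa [List.count_cons_of_ne (fun h => hvy h.symm)] at hc⟩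
          · rintro (h | ⟨v, hv, hne, hc⟩)
            · exact ⟨y, List.mem_cons_self, fun h => hxy h.symm, by rw [List.count_cons_self]; omega⟩
            · refine ⟨v, List.mem_cons_of_mem _ hv, fun h => hxnt (h ▸ hv), ?_⟩
              rwa [List.count_cons_of_ne (fun h => hne h.symm)]
        rw [h3]
        cases b <;> cases hc2 : (c == 2) <;> simp [Bool.or_comm]

-- The full run scan over sorted(fl) detects exactly the values occurring exactly twice in fl.
theorem dup_scan_eq (fl : List String) :
    (let s := PySem.List.sorted fl (fun x => x) false
     let st := s.foldl pvRunStep (none, 0, false)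
     st.2.2 || (st.2.1 == 2))
    = decide (∃ v ∈ fl, fl.count v = 2) := by
  have hperm := PySem.List.sorted_perm fl (fun x => x) false
  cases hs : PySem.List.sorted fl (fun x => x) false with
  | nil =>
      have : fl = [] := (PySem.List.sorted_eq_nil_iff fl (fun x => x) false).mp hs
      subst this; exact rfl
  | cons y t =>
      have hpw : List.Pairwise (· ≤ ·) (y :: t) := by
        have := PySem.List.sorted_pairwise fl (fun x => x)
        rwa [hs] at this
      rw [hs] at hperm
      dsimp only
      rw [List.foldl_cons, show pvRunStep (none, 0, false) y = (some y, 1, false) from by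
        simp [pvRunStep]]
      rw [runScan_spec t y 1 false hpw]
      rw [Bool.false_or, Bool.eq_iff_iff]
      simp only [Bool.or_eq_true, decide_eq_true_eq]
      constructor
      · rintro (h | ⟨v, hv, hne, hc⟩)
        · refine ⟨y, hperm.mem_iff.mp List.mem_cons_self, ?_⟩
          rw [← hperm.count_eq, List.count_cons_self]; omega
        · refine ⟨v, hperm.mem_iff.mp (List.mem_cons_of_mem _ hv), ?_⟩
          rw [← hperm.count_eq, List.count_cons_of_ne (fun h => hne h.symm)]; exact hc
      · rintro ⟨v, hv, hc⟩
        rw [← hperm.mem_iff] at hv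
        rw [← hperm.count_eq] at hc
        by_cases hvy : v = y
        · subst hvy; left; rw [List.count_cons_self] at hc; omega
        · right
          rcases List.mem_cons.mp hv with h | h
          · exact absurd h hvy
          · exact ⟨v, h, hvy, by rwa [List.count_cons_of_ne (fun h => hvy h.symm)] at hc⟩

-- A's dedup-and-count duplicate test, as the same existential over the filtered list.
theorem dupA_eq (normalized : List String) :
    (PySem.Set.ofList normalized).any
        (fun norm_p => decide (norm_p ≠ "") && (normalized.count norm_p == 2))
    = decide (∃ v ∈ normalized.filter (fun n => decide (n ≠ "")), (normalized.filter (fun n => decide (n ≠ ""))).count v = 2) := by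
  rw [Bool.eq_iff_iff]
  simp only [List.any_eq_true, PySem.Set.mem_ofList, Bool.and_eq_true, decide_eq_true_eq,
    beq_iff_eq, List.mem_filter]
  constructor
  · rintro ⟨v, hv, hne, hc⟩
    refine ⟨v, ⟨hv, by simpa using hne⟩, ?_⟩
    rw [List.count_filter (by simpa using hne)]; exact hc
  · rintro ⟨v, ⟨hv, hne⟩, hc⟩
    have hne' : v ≠ "" := by simpa using hne
    refine ⟨v, hv, hne', ?_⟩
    rw [List.count_filter (by simpa using hne)] at hc; exact hc

-- B's set-inclusion field check equals A's two per-element any-scans.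
theorem fields_eq (params modules_params modules_return_map : List String) :
    (!(PySem.Set.issubset (PySem.Set.ofList params) (PySem.Set.ofList modules_params) &&
       PySem.Set.issubset (PySem.Set.ofList params) (PySem.Set.ofList modules_return_map)))
    = (params.any (fun p => !(modules_params.contains p)) ||
       params.any (fun p => !(modules_return_map.contains p))) := by
  rw [Bool.eq_iff_iff]
  simp [Bool.eq_false_iff, Ne, PySem.Set.issubset_iff, PySem.Set.mem_ofList]

-- ===== VERDICT (by name: the statement is the Claim_ definition above) =====
theorem is_interaction_eq_spec : Claim_equal_is_interaction_eq := by
  intro params mp mr _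
  unfold Spec_is_interaction_eq is_interaction_eq is_interaction_eq_alt
  simp only
  rw [dup_scan_eq, dupA_eq, fields_eq]
  set d := decide (∃ v ∈ (params.map (fun p => PySem.Str.replace p "_" "")).filter (fun n => decide (n ≠ "")),
      ((params.map (fun p => PySem.Str.replace p "_" "")).filter (fun n => decide (n ≠ ""))).count v = 2) with hd
  cases d <;> cases hpre : (params.any (fun p => PySem.Str.endswith p "_") &&
      params.any (fun p => PySem.Str.startswith p "_")) <;>
    simp only [Bool.false_or, Bool.true_or, Bool.or_false, Bool.or_true] <;>
    first
      | rfl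
      | (rw [Bool.eq_iff_iff]; simp [List.any_eq_true])
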